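-- pv_equiv track=rewrite | github.com/Antoni-Dulewicz/algorithms-and-data-structures | offline/ex2/zad2.py | snow
-- ===== SOURCE A (Python) =====
-- def snow(S):
--     S.sort()
--     S = S[::-1]
--     cnt = 0
--     n = len(S)
--     sum = 0
--     for i in range(n):
--         if S[i]-cnt <= 0:
--             return sum
--         else:
--             sum += S[i]-cnt
--         cnt += 1
--
--     return sum
-- ===== SOURCE B (Python) =====
-- def snow(S):
--     S.sort()  # same in-place ascending sort side-effect as A
--     n = len(S)
--     # binary search for k = number of elements taken: the predicate
--     # "S[n-1-i] - i > 0" is monotone (true then false) on the sorted list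
--     lo, hi = 0, n
--     while lo < hi:
--         mid = (lo + hi) // 2
--         if S[n - 1 - mid] - mid > 0:
--             lo = mid + 1
--         else:
--             hi = mid
--     return sum(S[n - lo:]) - lo * (lo - 1) // 2
-- ===== Notes on version B (the rewrite author's own statement) =====
-- stated objective: alternative
-- what changed: B replaces A's linear accumulate-with-early-return scan by a binary search for k (the number of elements taken, exploiting that S_desc[i]-i is monotone on the sorted list) followed by a closed-form total sum(S[n-k:]) - k*(k-1)//2; the in-place ascending sort side effect is preserved.
import Mathlib
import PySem

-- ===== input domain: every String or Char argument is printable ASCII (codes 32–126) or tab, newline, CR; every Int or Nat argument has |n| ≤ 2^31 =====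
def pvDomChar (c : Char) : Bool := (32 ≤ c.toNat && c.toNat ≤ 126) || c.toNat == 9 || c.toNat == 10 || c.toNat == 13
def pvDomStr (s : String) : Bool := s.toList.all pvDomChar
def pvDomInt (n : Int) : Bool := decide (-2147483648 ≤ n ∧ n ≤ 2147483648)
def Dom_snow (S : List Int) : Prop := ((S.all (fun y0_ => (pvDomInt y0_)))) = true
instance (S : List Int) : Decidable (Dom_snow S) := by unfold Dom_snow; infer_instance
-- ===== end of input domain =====

-- B replaces A's linear accumulate-with-early-return scan by a binary search for k, the
-- number of elements taken (the tested condition is monotone on the sorted list), followed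
-- by the closed-form total sum(S[n-k:]) - k*(k-1)//2; both Pythons sort the argument in
-- place (same side effect), the equivalence proved here is about the return value.

-- ===== PORT A =====
-- the for/early-return loop of A: state (cnt, sum), descending list consumed element by element
def snowLoopA : List Int → Int → Int → Int
  | [], _, acc => acc
  | x :: xs, cnt, acc => if x - cnt ≤ 0 then acc else snowLoopA xs (cnt + 1) (acc + (x - cnt))

def snow (S : List Int) : Int :=
  -- S.sort(); S = S[::-1]  (S[::-1] is reverse)
  snowLoopA (PySem.List.sorted S (fun x => x) false).reverse 0 0

-- ===== PORT B =====
-- the while lo < hi binary-search loop of B (indexing S[n-1-mid] is always in range here)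
def bsLoop (t : List Int) (n : Int) (lo hi : Int) : Int :=
  if h : lo < hi then
    let mid := PySem.Int.floordiv (lo + hi) 2
    if PySem.List.pyGetD t (n - 1 - mid) 0 - mid > 0 then
      bsLoop t n (mid + 1) hi
    else
      bsLoop t n lo mid
  else lo
termination_by (hi - lo).toNat
decreasing_by
  · have hb := PySem.Int.floordiv_two_mid_bounds (le_of_lt h)
    have hlt : PySem.Int.floordiv (lo + hi) 2 < hi := by
      rw [PySem.Int.floordiv_lt_iff_lt_mul (by omega : (0:Int) < 2)]; omega
    omega
  · have hb := PySem.Int.floordiv_two_mid_bounds (le_of_lt h)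
    have hlt : PySem.Int.floordiv (lo + hi) 2 < hi := by
      rw [PySem.Int.floordiv_lt_iff_lt_mul (by omega : (0:Int) < 2)]; omega
    omega

def snow_alt (S : List Int) : Int :=
  let t := PySem.List.sorted S (fun x => x) false
  let n : Int := t.length
  let k := bsLoop t n 0 n
  (PySem.List.slice t (some (n - k)) none).sum - PySem.Int.floordiv (k * (k - 1)) 2

-- ===== PRECONDITION & SPEC =====
def Spec_snow (S : List Int) (out : Int) : Prop := out = snow_alt S
instance (S : List Int) (out : Int) : Decidable (Spec_snow S out) := by unfold Spec_snow; infer_instance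

-- ===== CLAIM (what is proved, stated in full; the proofs are below) =====
def Claim_equal_snow : Prop := ∀ (S : List Int), Dom_snow S → Spec_snow S (snow S)

-- ===== LEMMAS AND PROOFS =====

-- number of elements taken, as a Nat (proof-side characterisation of A's loop length)
def mNat : List Int → Int → Nat
  | [], _ => 0
  | v :: vs, c => if v ≤ c then 0 else mNat vs (c + 1) + 1

-- triangular number, recursively
def tri : Nat → Int
  | 0 => 0
  | n + 1 => tri n + n

theorem mNat_le_length : ∀ (d : List Int) (c : Int), mNat d c ≤ d.length
  | [], _ => by simp [mNat]
  | v :: vs, c => by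
    by_cases h : v ≤ c
    · simp [mNat, h]
    · simp only [mNat, if_neg h, List.length_cons]
      exact Nat.succ_le_succ (mNat_le_length vs (c + 1))

-- inside the taken prefix the value beats the counter
theorem mNat_lt : ∀ (d : List Int) (c : Int) (i : Nat) (hi : i < d.length),
    i < mNat d c → c + i < d[i]
  | [], _, _, hi, _ => by simp at hi
  | v :: vs, c, i, hi, hm => by
    by_cases h : v ≤ c
    · simp [mNat, h] at hm
    · cases i with
      | zero => simpa using lt_of_not_ge h
      | succ j =>
        simp only [mNat, if_neg h] at hm
        have := mNat_lt vs (c + 1) j (by simpa using hi) (by omega)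
        simpa [List.getElem_cons_succ] using by omega

-- at the boundary the value no longer beats the counter
theorem mNat_boundary : ∀ (d : List Int) (c : Int) (h : mNat d c < d.length),
    d[mNat d c] ≤ c + mNat d c
  | [], _, h => by simp at h
  | v :: vs, c, h => by
    by_cases hv : v ≤ c
    · simpa [mNat, hv] using hv
    · simp only [mNat, if_neg hv] at h ⊢
      have := mNat_boundary vs (c + 1) (by simpa using h)
      simpa [List.getElem_cons_succ] using by omega

-- past the boundary, on a descending list, the value stays ≤ the index
theorem past_boundary (d : List Int) (hp : d.Pairwise (fun a b => b ≤ a))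
    (i : Nat) (hi : i < d.length) (hk : mNat d 0 ≤ i) : d[i] ≤ (i : Int) := by
  have hkl : mNat d 0 < d.length := lt_of_le_of_lt hk hi
  have hb := mNat_boundary d 0 hkl
  rcases eq_or_lt_of_le hk with hk' | hk'
  · subst hk'; omega
  · have := (List.pairwise_iff_getElem.mp hp) (mNat d 0) i hkl hi hk'
    omega

theorem snowLoopA_eq : ∀ (d : List Int) (c a : Int),
    snowLoopA d c a = a + (d.take (mNat d c)).sum - (mNat d c : Int) * c - tri (mNat d c)
  | [], c, a => by simp [snowLoopA, mNat, tri]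
  | v :: vs, c, a => by
    by_cases h : v - c ≤ 0
    · have h' : v ≤ c := by omega
      simp [snowLoopA, mNat, h, h', tri]
    · have h' : ¬ v ≤ c := by omega
      simp only [snowLoopA, if_neg h, mNat, if_neg h', List.take_succ_cons, List.sum_cons, tri]
      rw [snowLoopA_eq vs (c + 1) (a + (v - c))]
      push_cast; ring

theorem tri_floordiv : ∀ (m : Nat), PySem.Int.floordiv ((m : Int) * ((m : Int) - 1)) 2 = tri m
  | 0 => by decide
  | n + 1 => by
    have hc : ((n : Int)) * ((n : Int) - 1) = ((n * (n - 1) : Nat) : Int) := by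
      cases n with
      | zero => simp
      | succ m => push_cast [Nat.succ_sub_one]; ring
    have h1 : (((n + 1 : Nat)) : Int) * ((((n + 1 : Nat)) : Int) - 1) = (((n + 1) * n : Nat) : Int) := by
      push_cast; ring
    have h2 : (n + 1) * n = n * (n - 1) + 2 * n := by
      cases n with
      | zero => rfl
      | succ m => simp; ring
    have h4 : PySem.Int.floordiv ((((n + 1) * n : Nat)) : Int) 2 = ((((n + 1) * n / 2 : Nat)) : Int) := by
      exact_mod_cast PySem.Int.floordiv_natCast ((n + 1) * n) 2
    have h5 : PySem.Int.floordiv (((n * (n - 1) : Nat)) : Int) 2 = (((n * (n - 1) / 2 : Nat)) : Int) := by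
      exact_mod_cast PySem.Int.floordiv_natCast (n * (n - 1)) 2
    have ih := tri_floordiv n
    rw [hc, h5] at ih
    have h3 : ((n + 1) * n) / 2 = n * (n - 1) / 2 + n := by
      rw [h2, Nat.add_mul_div_left _ _ (by omega : 0 < 2)]
    rw [h1, h4, h3]
    simp only [tri]
    rw [← ih]
    push_cast; ring

-- the binary search lands exactly on the boundary mNat t.reverse 0
theorem bsLoop_eq (t : List Int) (hp : t.reverse.Pairwise (fun a b => b ≤ a)) :
    ∀ (fuel : Nat) (lo hi : Int), (hi - lo).toNat ≤ fuel →
      0 ≤ lo → lo ≤ (mNat t.reverse 0 : Int) → (mNat t.reverse 0 : Int) ≤ hi →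
      hi ≤ (t.length : Int) →
      bsLoop t (t.length : Int) lo hi = (mNat t.reverse 0 : Int)
  | 0, lo, hi, hf, h0, hlk, hkh, hhn => by
    rw [bsLoop]
    have : ¬ lo < hi := by omega
    simp only [dif_neg this]
    omega
  | fuel + 1, lo, hi, hf, h0, hlk, hkh, hhn => by
    rw [bsLoop]
    by_cases h : lo < hi
    · simp only [dif_pos h]
      have hb := PySem.Int.floordiv_two_mid_bounds (le_of_lt h)
      have hlt : PySem.Int.floordiv (lo + hi) 2 < hi := by
        rw [PySem.Int.floordiv_lt_iff_lt_mul (by omega : (0:Int) < 2)]; omega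
      set mid := PySem.Int.floordiv (lo + hi) 2 with hmid
      have hmid0 : 0 ≤ mid := by omega
      have hmidn : mid < (t.length : Int) := by omega
      have hm : mid = (mid.toNat : Int) := by omega
      have hrl : mid.toNat < t.reverse.length := by
        rw [List.length_reverse]; omega
      have hidx : PySem.List.pyGetD t ((t.length : Int) - 1 - mid) 0 = t.reverse[mid.toNat] := by
        rw [PySem.List.pyGetD_eq_getElem t 0 (by omega) (by omega)]
        rw [List.getElem_reverse]
        congr 1
        omega
      rw [hidx]
      by_cases hc : t.reverse[mid.toNat] - mid > 0
      · simp only [if_pos hc]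
        -- value still beats the index ⇒ mid < k
        have hmk : mid < (mNat t.reverse 0 : Int) := by
          by_contra hge
          have := past_boundary t.reverse hp mid.toNat hrl (by omega)
          omega
        exact bsLoop_eq t hp fuel (mid + 1) hi (by omega) (by omega) (by omega) hkh hhn
      · simp only [if_neg hc]
        -- value no longer beats the index ⇒ k ≤ mid
        have hmk : (mNat t.reverse 0 : Int) ≤ mid := by
          by_contra hlt'
          have := mNat_lt t.reverse 0 mid.toNat hrl (by omega)
          omega
        exact bsLoop_eq t hp fuel lo mid (by omega) h0 hlk (by omega) (by omega)
    · simp only [dif_neg h]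
      omega

-- sum of the last m elements of t = sum of the first m elements of t.reverse
theorem drop_sum_eq_reverse_take_sum (t : List Int) (m : Nat) (hm : m ≤ t.length) :
    (t.drop (t.length - m)).sum = (t.reverse.take m).sum := by
  rw [← List.sum_reverse (t.drop (t.length - m)), List.reverse_drop]
  have : t.length - (t.length - m) = m := by omega
  rw [this]

-- ===== VERDICT (by name: the statement is the Claim_ definition above) =====
theorem snow_spec : Claim_equal_snow := by
  intro S _
  unfold Spec_snow snow snow_alt
  have hp : (PySem.List.sorted S (fun x => x) false).reverse.Pairwise (fun a b => b ≤ a) := by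
    rw [List.pairwise_reverse]
    exact PySem.List.sorted_pairwise S (fun x => x)
  generalize hT : PySem.List.sorted S (fun x => x) false = t at hp ⊢
  simp only []
  have hle : mNat t.reverse 0 ≤ t.length := by
    have := mNat_le_length t.reverse 0
    simpa using this
  have hbs : bsLoop t (t.length : Int) 0 (t.length : Int) = (mNat t.reverse 0 : Int) :=
    bsLoop_eq t hp (t.length : Int).toNat 0 (t.length : Int) (by omega) le_rfl
      (by exact_mod_cast Nat.zero_le _) (by exact_mod_cast hle) le_rfl
  rw [hbs]
  have hcast : ((t.length : Int) - ((mNat t.reverse 0 : Nat) : Int))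
      = ((t.length - mNat t.reverse 0 : Nat) : Int) := by omega
  rw [hcast, PySem.List.slice_from_natCast, snowLoopA_eq, tri_floordiv,
    drop_sum_eq_reverse_take_sum t (mNat t.reverse 0) hle]
  ring
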